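-- pv_equiv track=rewrite | github.com/tulip85/advent-of-code | 2024/Day9/day9.py | compact_string_tuples
-- ===== SOURCE A (Python) =====
-- DOT ="."
--
-- def compact_string_tuples(in_str):
--     out_str = []
--     element = None
--     element_count = 0
--     for c in in_str:
--         if c[0] == DOT:
--             if c[0] == element:
--                 element_count += c[1]
--             else:
--                 if element != None and element == DOT:
--                     out_str.append((element, element_count))
--                 element = c[0]
--                 element_count = c[1]
--         else:
--             if element == DOT:
--                 out_str.append((element, element_count))
--             element = c[0]
--             element_count = c[1]
--             out_str.append(c)
--
--     if element == DOT and (len(out_str) == 0 or out_str[len(out_str)-1] != (element, element_count) ):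
--         out_str.append((element, element_count))
--     return out_str
-- ===== SOURCE B (Python) =====
-- DOT = "."
--
--
-- def compact_string_tuples(in_str):
--     # Build the result back-to-front: walk the input in reverse and merge each
--     # dot tuple into the dot run already sitting at the front of the result
--     # (represented here as out[-1], since out is kept reversed until the end).
--     out = []
--     for c in reversed(in_str):
--         if c[0] == DOT and out and out[-1][0] == DOT:
--             out[-1] = (DOT, c[1] + out[-1][1])
--         else:
--             out.append(c)
--     out.reverse()
--     return out
-- ===== Notes on version B (the rewrite author's own statement) =====
-- stated objective: alternative
-- what changed: Replaced A's forward single-pass state machine (pending element/count threaded through every branch plus a trailing flush guard) by a back-to-front construction: walk the input in reverse and merge each dot tuple directly into the dot run at the front of the partially built output, so there is no pending state and no final flush.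
import Mathlib
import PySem

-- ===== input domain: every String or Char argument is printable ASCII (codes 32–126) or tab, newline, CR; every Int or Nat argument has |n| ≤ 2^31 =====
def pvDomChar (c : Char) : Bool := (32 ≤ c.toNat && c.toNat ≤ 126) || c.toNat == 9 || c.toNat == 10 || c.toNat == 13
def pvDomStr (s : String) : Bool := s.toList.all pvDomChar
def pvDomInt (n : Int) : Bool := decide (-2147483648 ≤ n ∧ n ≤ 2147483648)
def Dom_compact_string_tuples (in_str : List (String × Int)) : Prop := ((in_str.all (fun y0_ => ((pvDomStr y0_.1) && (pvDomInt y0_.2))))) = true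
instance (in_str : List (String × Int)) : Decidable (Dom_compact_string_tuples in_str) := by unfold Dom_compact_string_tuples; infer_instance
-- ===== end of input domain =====

-- B replaces A's forward state machine (pending element/count + trailing flush guard)
-- by a back-to-front construction that merges each dot tuple into the dot run at the
-- front of the partially built output; objective: alternative (no speed claim).

-- ===== PORT A =====
-- one loop step of A: state = (out_str, element, element_count)
def pvStepA (st : List (String × Int) × Option String × Int) (c : String × Int) :
    List (String × Int) × Option String × Int :=
  match st with
  | (out, element, cnt) =>
    if c.1 = "." then
      if element = some c.1 then (out, element, cnt + c.2)
      else
        let out' := if element ≠ none ∧ element = some "." then out ++ [(".", cnt)] else out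
        (out', some c.1, c.2)
    else
      let out' := if element = some "." then out ++ [(".", cnt)] else out
      (out' ++ [c], some c.1, c.2)

def compact_string_tuples (in_str : List (String × Int)) : List (String × Int) :=
  match in_str.foldl pvStepA ([], none, 0) with
  | (out, element, cnt) =>
    -- final guard: `if element == DOT and (len(out)==0 or out[len(out)-1] != (element, element_count))`
    match element with
    | none => out
    | some e =>
      if e = "." ∧ (out.length = 0 ∨ PySem.List.pyGet? out ((out.length : Int) - 1) ≠ some (e, cnt))
      then out ++ [(e, cnt)] else out

-- ===== PORT B =====
-- B's loop body; `acc` is Python's `out` list held reversed (Python appends at the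
-- end and reverses once at the exit, so Python's out[-1] is acc's head, append is
-- cons, and the final out.reverse() is the identity on acc).
def pvStepB (acc : List (String × Int)) (c : String × Int) : List (String × Int) :=
  match acc with
  | h :: t => if c.1 = "." ∧ h.1 = "." then (".", c.2 + h.2) :: t else c :: h :: t
  | [] => [c]

def compact_string_tuples_alt (in_str : List (String × Int)) : List (String × Int) :=
  in_str.reverse.foldl pvStepB []

-- ===== PRECONDITION & SPEC =====
def Spec_compact_string_tuples (in_str : List (String × Int)) (out : List (String × Int)) : Prop := out = compact_string_tuples_alt in_str
instance (in_str : List (String × Int)) (out : List (String × Int)) : Decidable (Spec_compact_string_tuples in_str out) := by unfold Spec_compact_string_tuples; infer_instance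

-- ===== CLAIM (what is proved, stated in full; the proofs are below) =====
def Claim_equal_compact_string_tuples : Prop := ∀ (in_str : List (String × Int)), Dom_compact_string_tuples in_str → Spec_compact_string_tuples in_str (compact_string_tuples in_str)

-- ===== LEMMAS AND PROOFS =====

-- canonical description of the merged-run list, used to relate the two ports:
-- maximal runs of equal "is a dot" key, each dot run summed, other runs kept
def pvGroupBy (key : (String × Int) → Bool) : List (String × Int) → List (Bool × List (String × Int))
  | [] => []
  | c :: rest =>
    (key c, c :: rest.takeWhile (fun x => key x == key c)) ::
      pvGroupBy key (rest.dropWhile (fun x => key x == key c))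
termination_by l => l.length
decreasing_by
  simpa using Nat.lt_succ_of_le (List.length_dropWhile_le _ _)

def pvSumCounts (g : List (String × Int)) : Int := g.foldl (fun a x => a + x.2) 0

def pvEmitG : List (Bool × List (String × Int)) → List (String × Int)
  | [] => []
  | g :: gs => (if g.1 then [(".", pvSumCounts g.2)] else g.2) ++ pvEmitG gs

-- E l = the canonical merged form of l
def pvE (l : List (String × Int)) : List (String × Int) :=
  pvEmitG (pvGroupBy (fun c => c.1 == ".") l)

theorem pvE_nil : pvE [] = [] := by simp [pvE, pvGroupBy, pvEmitG]

theorem pvE_cons_nondot (c : String × Int) (rest : List (String × Int)) (hc : c.1 ≠ ".") :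
    pvE (c :: rest) = c :: pvE rest := by
  have hcb : (c.1 == ".") = false := by simp [hc]
  cases rest with
  | nil => simp [pvE, pvGroupBy, pvEmitG, hcb]
  | cons d rest' =>
    by_cases hd : d.1 = "."
    · simp [pvE, pvGroupBy, pvEmitG, hcb, hd]
    · have hdb : (d.1 == ".") = false := by simp [hd]
      simp [pvE, pvGroupBy, pvEmitG, hcb, hdb]

theorem pvE_dot_merge (n m : Int) (rest : List (String × Int)) :
    pvE ((".", n) :: (".", m) :: rest) = pvE ((".", n + m) :: rest) := by
  have hsum : ∀ (g : List (String × Int)) (a b : Int),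
      g.foldl (fun a x => a + x.2) (a + b) = a + g.foldl (fun a x => a + x.2) b := by
    intro g
    induction g with
    | nil => intro a b; rfl
    | cons x g ih => intro a b; simp only [List.foldl_cons]; rw [add_assoc, ih]
  simp only [pvE, pvGroupBy, List.takeWhile, List.dropWhile]
  simp [pvEmitG, pvSumCounts, hsum]

theorem pvE_dot_nil (n : Int) : pvE [(".", n)] = [(".", n)] := by
  simp [pvE, pvGroupBy, pvEmitG, pvSumCounts]

theorem pvE_dot_cons_nondot (n : Int) (c : String × Int) (rest : List (String × Int))
    (hc : c.1 ≠ ".") :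
    pvE ((".", n) :: c :: rest) = (".", n) :: pvE (c :: rest) := by
  have hcb : (c.1 == ".") = false := by simp [hc]
  simp [pvE, pvGroupBy, pvEmitG, pvSumCounts, hcb]

-- ---- B = pvE ----

theorem pvAlt_foldr (l : List (String × Int)) :
    compact_string_tuples_alt l = l.foldr (fun c acc => pvStepB acc c) [] := by
  simp [compact_string_tuples_alt, List.foldl_reverse]

theorem pvStepB_dot_dot (n m : Int) (r : List (String × Int)) :
    pvStepB (pvStepB r (".", m)) (".", n) = pvStepB r (".", n + m) := by
  cases r with
  | nil => simp [pvStepB]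
  | cons h t =>
    by_cases hh : h.1 = "."
    · simp [pvStepB, hh]; ring
    · simp [pvStepB, hh]

theorem pvE_step (rest : List (String × Int)) :
    ∀ c : String × Int, pvE (c :: rest) = pvStepB (pvE rest) c := by
  induction rest with
  | nil =>
    intro c
    by_cases hc : c.1 = "."
    · have hc' : c = (".", c.2) := by rw [← hc]
      rw [hc', pvE_dot_nil]; simp [pvE_nil, pvStepB]
    · rw [pvE_cons_nondot c [] hc, pvE_nil]; simp [pvStepB]
  | cons d l' ih =>
    intro c
    by_cases hc : c.1 = "."
    · have hc' : c = (".", c.2) := by rw [← hc]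
      by_cases hd : d.1 = "."
      · have hd' : d = (".", d.2) := by rw [← hd]
        rw [hc', hd', pvE_dot_merge, ih (".", c.2 + d.2), ← pvStepB_dot_dot,
          ← ih (".", d.2)]
      · rw [hc', pvE_dot_cons_nondot c.2 d l' hd, pvE_cons_nondot d l' hd]
        simp [pvStepB, hd]
    · rw [pvE_cons_nondot c (d :: l') hc]
      cases pvE (d :: l') with
      | nil => simp [pvStepB]
      | cons h t => simp [pvStepB, hc]
theorem pvB_eq_E (l : List (String × Int)) : compact_string_tuples_alt l = pvE l := by
  rw [pvAlt_foldr]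
  induction l with
  | nil => simp [pvE_nil]
  | cons c rest ih => rw [List.foldr_cons, ih, ← pvE_step]

-- ---- A = pvE ----

-- A's loop followed by A's final guard, started from an arbitrary state
def pvRunA (st : List (String × Int) × Option String × Int) (l : List (String × Int)) :
    List (String × Int) :=
  match l.foldl pvStepA st with
  | (out, element, cnt) =>
    match element with
    | none => out
    | some e =>
      if e = "." ∧ (out.length = 0 ∨ PySem.List.pyGet? out ((out.length : Int) - 1) ≠ some (e, cnt))
      then out ++ [(e, cnt)] else out

-- the accumulated output never ends in a dot tuple while a dot run is pending
def pvLastOk (out : List (String × Int)) : Prop :=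
  ∀ x, out.getLast? = some x → x.1 ≠ "."

theorem pvLastOk_append (out : List (String × Int)) (c : String × Int) (hc : c.1 ≠ ".") :
    pvLastOk (out ++ [c]) := by
  intro x hx
  simp [List.getLast?_append] at hx
  simpa [← hx] using hc

theorem pvGuard_fires (out : List (String × Int)) (cnt : Int) (h : pvLastOk out) :
    out.length = 0 ∨ PySem.List.pyGet? out ((out.length : Int) - 1) ≠ some (".", cnt) := by
  rcases List.eq_nil_or_concat out with rfl | ⟨ys, z, rfl⟩
  · exact Or.inl rfl
  · simp only [List.concat_eq_append] at h ⊢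
    right
    have hz : z.1 ≠ "." := h z (by simp)
    have hlen : ((ys ++ [z]).length : Int) - 1 = (ys.length : Int) := by
      simp only [List.length_append, List.length_cons, List.length_nil]
      push_cast
      omega
    rw [hlen, PySem.List.pyGet?_append_length]
    intro hcontra
    exact hz (by injection hcontra with h'; rw [h'])

-- the main invariant, both pending-states at once
theorem pvRunA_inv (l : List (String × Int)) :
    (∀ out cnt, pvLastOk out →
        pvRunA (out, some ".", cnt) l = out ++ pvE ((".", cnt) :: l)) ∧
    (∀ out s cnt, s ≠ "." → pvLastOk out →
        pvRunA (out, some s, cnt) l = out ++ pvE l) := by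
  induction l with
  | nil =>
    constructor
    · intro out cnt hout
      simp only [pvRunA, List.foldl_nil]
      rw [if_pos ⟨trivial, pvGuard_fires out cnt hout⟩, pvE_dot_nil]
    · intro out s cnt hs _
      simp only [pvRunA, List.foldl_nil]
      rw [if_neg (by simp [hs]), pvE_nil, List.append_nil]
  | cons c rest ih =>
    constructor
    · intro out cnt hout
      by_cases hc : c.1 = "."
      · have hstep : pvStepA (out, some ".", cnt) c = (out, some ".", cnt + c.2) := by
          simp [pvStepA, hc]
        have : pvRunA (out, some ".", cnt) (c :: rest)
            = pvRunA (out, some ".", cnt + c.2) rest := by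
          simp only [pvRunA, List.foldl_cons, hstep]
        rw [this, ih.1 out (cnt + c.2) hout]
        have hc' : c = (".", c.2) := by rw [← hc]
        rw [hc', pvE_dot_merge]
      · have hstep : pvStepA (out, some ".", cnt) c
            = (out ++ [(".", cnt)] ++ [c], some c.1, c.2) := by
          simp [pvStepA, hc]
        have : pvRunA (out, some ".", cnt) (c :: rest)
            = pvRunA (out ++ [(".", cnt)] ++ [c], some c.1, c.2) rest := by
          simp only [pvRunA, List.foldl_cons, hstep]
        rw [this, ih.2 _ c.1 c.2 hc (pvLastOk_append _ c hc)]
        have hc' : c = (c.1, c.2) := rfl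
        rw [show ((".", cnt) : String × Int) :: c :: rest = (".", cnt) :: (c.1, c.2) :: rest by rw [← hc'],
          pvE_dot_cons_nondot cnt (c.1, c.2) rest hc, ← hc']
        simp [pvE_cons_nondot c rest hc]
    · intro out s cnt hs hout
      by_cases hc : c.1 = "."
      · have hstep : pvStepA (out, some s, cnt) c = (out, some ".", c.2) := by
          simp only [pvStepA, if_pos hc]
          rw [if_neg (fun h => hs (by injection h with h'; rw [h', hc])),
            if_neg (fun h => hs (by injection h.2))]
          simp [hc]
        have : pvRunA (out, some s, cnt) (c :: rest) = pvRunA (out, some ".", c.2) rest := by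
          simp only [pvRunA, List.foldl_cons, hstep]
        rw [this, ih.1 out c.2 hout]
        have hc' : c = (".", c.2) := by rw [← hc]
        rw [← hc']
      · have hstep : pvStepA (out, some s, cnt) c = (out ++ [c], some c.1, c.2) := by
          simp only [pvStepA, if_neg hc]
          rw [if_neg (fun h => hs (by injection h))]
        have : pvRunA (out, some s, cnt) (c :: rest)
            = pvRunA (out ++ [c], some c.1, c.2) rest := by
          simp only [pvRunA, List.foldl_cons, hstep]
        rw [this, ih.2 _ c.1 c.2 hc (pvLastOk_append _ c hc)]
        simp [pvE_cons_nondot c rest hc]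

theorem pvA_eq_E (l : List (String × Int)) : compact_string_tuples l = pvE l := by
  have hA : compact_string_tuples l = pvRunA ([], none, 0) l := rfl
  cases l with
  | nil => simp [compact_string_tuples, pvE, pvGroupBy, pvEmitG]
  | cons c rest =>
    rw [hA]
    by_cases hc : c.1 = "."
    · have hstep : pvStepA ([], none, 0) c = ([], some ".", c.2) := by
        simp [pvStepA, hc]
      have : pvRunA ([], none, 0) (c :: rest) = pvRunA ([], some ".", c.2) rest := by
        simp only [pvRunA, List.foldl_cons, hstep]
      rw [this, (pvRunA_inv rest).1 [] c.2 (by intro x hx; simp at hx)]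
      have hc' : c = (".", c.2) := by rw [← hc]
      rw [← hc']
      rfl
    · have hstep : pvStepA ([], none, 0) c = ([c], some c.1, c.2) := by
        simp [pvStepA, hc]
      have : pvRunA ([], none, 0) (c :: rest) = pvRunA ([c], some c.1, c.2) rest := by
        simp only [pvRunA, List.foldl_cons, hstep]
      rw [this, (pvRunA_inv rest).2 [c] c.1 c.2 hc (pvLastOk_append [] c hc)]
      simp [pvE_cons_nondot c rest hc]

-- ===== VERDICT (by name: the statement is the Claim_ definition above) =====
theorem compact_string_tuples_spec : Claim_equal_compact_string_tuples := by
  intro l _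
  unfold Spec_compact_string_tuples
  rw [pvA_eq_E, pvB_eq_E]
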